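-- pv_equiv track=rewrite | github.com/keshavgaddhyan/Search | Local Seach/nqueen.py | moveTwo
-- ===== SOURCE A (Python) =====
-- def countAttack(queen):
--     count = 0
--     for row1 in range( 0, len(queen) ):
--         for row2 in range( row1 + 1, len( queen ) ):
--             if queen[row1] == queen[row2]:
--                 count += 1
--             elif abs(queen[row1] - queen[row2]) == (row2 - row1):
--                 count += 1
--     return count
--
-- def moveTwo(queen):
--     xqueen= list(queen)
--     b=len(queen)
--     for i in range(0,len(queen)):
--         for j in range(0,len(queen)):
--             if i==j:
--                continue
--             else:
--                 temp=xqueen[i]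
--                 xqueen[i]=xqueen[j]
--                 xqueen[j]=temp
--                 a=countAttack(xqueen)
--                 if b >= a :
--                     b=a
--                     x=i
--                     y=j
--                 xqueen=list(queen)
--
--
--             temp=0
--
--     temp=xqueen[x]
--     xqueen[x]=xqueen[y]
--     xqueen[y]=temp
--     return xqueen
-- ===== SOURCE B (Python) =====
-- def attacked(d, v1, v2):
--     return 1 if (v1 == v2 or abs(v1 - v2) == d) else 0
--
-- def moveTwo(queen):
--     n = len(queen)
--     # base attack count of the board, computed once
--     total = 0
--     for r1 in range(n):
--         for r2 in range(r1 + 1, n):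
--             total += attacked(r2 - r1, queen[r1], queen[r2])
--     best = None
--     bx = by = 0
--     for i in range(n):
--         for j in range(n):
--             if i == j:
--                 continue
--             # swapping rows i and j only changes attacks of pairs touching row i or j
--             delta = 0
--             for k in range(n):
--                 if k == i or k == j:
--                     continue
--                 vk = queen[k]
--                 delta += attacked(abs(i - k), queen[j], vk) - attacked(abs(i - k), queen[i], vk)
--                 delta += attacked(abs(j - k), queen[i], vk) - attacked(abs(j - k), queen[j], vk)
--             a = total + delta
--             if best is None or a <= best:
--                 best = a
--                 bx, by = i, j
--     if best is None:
--         return list(queen)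
--     res = list(queen)
--     res[bx], res[by] = res[by], res[bx]
--     return res
-- ===== Notes on version B (the rewrite author's own statement) =====
-- stated objective: faster
-- what changed: B computes the board's attack count once and evaluates each candidate swap by an O(n) incremental delta over the two touched rows instead of recounting all O(n^2) pairs per swap, dropping the initial-threshold selection for a plain running minimum.
import Mathlib
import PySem

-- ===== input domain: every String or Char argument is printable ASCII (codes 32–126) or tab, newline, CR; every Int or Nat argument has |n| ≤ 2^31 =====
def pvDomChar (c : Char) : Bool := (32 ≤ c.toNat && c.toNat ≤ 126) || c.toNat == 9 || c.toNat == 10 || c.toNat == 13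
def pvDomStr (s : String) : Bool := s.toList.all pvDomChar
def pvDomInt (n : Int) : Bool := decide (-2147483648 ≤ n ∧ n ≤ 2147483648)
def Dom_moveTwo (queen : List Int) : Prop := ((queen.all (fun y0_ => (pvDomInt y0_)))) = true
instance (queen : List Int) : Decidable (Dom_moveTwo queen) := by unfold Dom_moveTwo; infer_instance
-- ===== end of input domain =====

-- B replaces A's per-swap full O(n^2) recount by a single base count plus an O(n) incremental
-- delta per candidate swap (objective: faster, O(n^4) → O(n^3)); return values agree on Pre_.

-- ===== PORT A =====
-- countAttack: literal port; indices produced by range(...) are always in range, so queen[r] is getD r 0 (exact).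
def countAttack (queen : List Int) : Int :=
  (List.range queen.length).foldl (fun count row1 =>
    (List.range' (row1 + 1) (queen.length - (row1 + 1))).foldl (fun count row2 =>
      if queen.getD row1 0 = queen.getD row2 0 then count + 1
      else if |queen.getD row1 0 - queen.getD row2 0| = (row2 : Int) - (row1 : Int) then count + 1
      else count) count) 0

def moveTwo (queen : List Int) : List Int :=
  let n := queen.length
  let st : List Int × Int × Option (Nat × Nat) :=
    (List.range n).foldl (fun st i =>
      (List.range n).foldl (fun st j =>
        if i = j then st
        else
          -- temp-swap of xqueen[i], xqueen[j]
          let xq := (st.1.set i (st.1.getD j 0)).set j (st.1.getD i 0)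
          let a := countAttack xq
          -- 'if b >= a: b=a; x=i; y=j' then 'xqueen = list(queen)'
          if a ≤ st.2.1 then (queen, a, some (i, j)) else (queen, st.2.1, st.2.2)) st)
      (queen, (n : Int), none)
  match st.2.2 with
  | some (x, y) => (st.1.set x (st.1.getD y 0)).set y (st.1.getD x 0)
  | none => st.1   -- Python raises NameError (x,y unbound) here; excluded by Pre_moveTwo

-- ===== PORT B =====
def attacked (d v1 v2 : Int) : Int := if v1 = v2 ∨ |v1 - v2| = d then 1 else 0

def moveTwo_alt (queen : List Int) : List Int :=
  let n := queen.length
  -- base attack count of the board, computed once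
  let total : Int :=
    (List.range n).foldl (fun total r1 =>
      (List.range' (r1 + 1) (n - (r1 + 1))).foldl (fun total (r2 : Nat) =>
        total + attacked ((r2 : Int) - (r1 : Int)) (queen.getD r1 0) (queen.getD r2 0)) total) 0
  let sel : Option Int × Nat × Nat :=
    (List.range n).foldl (fun sel i =>
      (List.range n).foldl (fun sel j =>
        if i = j then sel
        else
          -- swapping rows i and j only changes attacks of pairs touching row i or j
          let delta : Int :=
            (List.range n).foldl (fun delta (k : Nat) =>
              if k = i ∨ k = j then delta
              else
                let vk := queen.getD k 0
                delta + (attacked |(i : Int) - (k : Int)| (queen.getD j 0) vk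
                           - attacked |(i : Int) - (k : Int)| (queen.getD i 0) vk)
                      + (attacked |(j : Int) - (k : Int)| (queen.getD i 0) vk
                           - attacked |(j : Int) - (k : Int)| (queen.getD j 0) vk)) 0
          let a := total + delta
          match sel.1 with
          | none => (some a, i, j)
          | some best => if a ≤ best then (some a, i, j) else sel) sel)
      (none, 0, 0)
  match sel.1 with
  | none => queen   -- best is None: fewer than two rows; return a copy
  | some _ => (queen.set sel.2.1 (queen.getD sel.2.2 0)).set sel.2.2 (queen.getD sel.2.1 0)

-- ===== PRECONDITION & SPEC =====
-- Python A leaves x,y unbound (NameError) when len(queen) < 2 or when no swap reaches an attack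
-- count ≤ len(queen); Pre_ excludes exactly those inputs, on which A raises and returns nothing.
def Pre_moveTwo (queen : List Int) : Prop :=
  2 ≤ queen.length ∧
  ∃ i < queen.length, ∃ j < queen.length, i ≠ j ∧
    countAttack ((queen.set i (queen.getD j 0)).set j (queen.getD i 0)) ≤ (queen.length : Int)
instance (queen : List Int) : Decidable (Pre_moveTwo queen) := by unfold Pre_moveTwo; infer_instance

def pvWitness_moveTwo : List Int := [0, 2]

def Spec_moveTwo (queen : List Int) (out : List Int) : Prop := out = moveTwo_alt queen
instance (queen : List Int) (out : List Int) : Decidable (Spec_moveTwo queen out) := by unfold Spec_moveTwo; infer_instance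

-- ===== CLAIM (what is proved, stated in full; the proofs are below) =====
def Claim_equal_moveTwo : Prop := ∀ (queen : List Int), Dom_moveTwo queen → Pre_moveTwo queen → Spec_moveTwo queen (moveTwo queen)

-- ===== LEMMAS AND PROOFS =====

-- proof-side names for the two ports' building blocks
def swapL (q : List Int) (i j : Nat) : List Int := (q.set i (q.getD j 0)).set j (q.getD i 0)

def fA (q : List Int) (r1 r2 : Nat) : Int :=
  if q.getD r1 0 = q.getD r2 0 then 1
  else if |q.getD r1 0 - q.getD r2 0| = (r2 : Int) - (r1 : Int) then 1 else 0

def F2 (q : List Int) (n : Nat) : Int :=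
  ∑ r1 ∈ Finset.range n, ∑ r2 ∈ Finset.Ico (r1 + 1) n, fA q r1 r2

def a1 (q : List Int) (i j k : Nat) : Int :=
  attacked |(i : Int) - (k : Int)| (q.getD j 0) (q.getD k 0)
    - attacked |(i : Int) - (k : Int)| (q.getD i 0) (q.getD k 0)

def b1 (q : List Int) (i j k : Nat) : Int :=
  attacked |(j : Int) - (k : Int)| (q.getD i 0) (q.getD k 0)
    - attacked |(j : Int) - (k : Int)| (q.getD j 0) (q.getD k 0)

def totalB (q : List Int) : Int :=
  (List.range q.length).foldl (fun total r1 =>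
    (List.range' (r1 + 1) (q.length - (r1 + 1))).foldl (fun total (r2 : Nat) =>
      total + attacked ((r2 : Int) - (r1 : Int)) (q.getD r1 0) (q.getD r2 0)) total) 0

def deltaB (q : List Int) (i j : Nat) : Int :=
  (List.range q.length).foldl (fun delta (k : Nat) =>
    if k = i ∨ k = j then delta
    else
      let vk := q.getD k 0
      delta + (attacked |(i : Int) - (k : Int)| (q.getD j 0) vk
                 - attacked |(i : Int) - (k : Int)| (q.getD i 0) vk)
            + (attacked |(j : Int) - (k : Int)| (q.getD i 0) vk
                 - attacked |(j : Int) - (k : Int)| (q.getD j 0) vk)) 0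

def cB (q : List Int) (p : Nat × Nat) : Int := totalB q + deltaB q p.1 p.2

def stepA (q : List Int) (st : List Int × Int × Option (Nat × Nat)) (p : Nat × Nat) :
    List Int × Int × Option (Nat × Nat) :=
  if p.1 = p.2 then st
  else
    let xq := (st.1.set p.1 (st.1.getD p.2 0)).set p.2 (st.1.getD p.1 0)
    let a := countAttack xq
    if a ≤ st.2.1 then (q, a, some (p.1, p.2)) else (q, st.2.1, st.2.2)

def stepB (q : List Int) (sel : Option Int × Nat × Nat) (p : Nat × Nat) :
    Option Int × Nat × Nat :=
  if p.1 = p.2 then sel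
  else
    match sel.1 with
    | none => (some (cB q p), p.1, p.2)
    | some best => if cB q p ≤ best then (some (cB q p), p.1, p.2) else sel

def pairsL (n : Nat) : List (Nat × Nat) :=
  (List.range n).flatMap (fun i => (List.range n).map (fun j => (i, j)))

lemma mem_pairsL {n : Nat} {p : Nat × Nat} : p ∈ pairsL n ↔ p.1 < n ∧ p.2 < n := by
  rcases p with ⟨i, j⟩
  simp [pairsL]

-- basic facts about attacked / fA
lemma attacked_comm (d v1 v2 : Int) : attacked d v1 v2 = attacked d v2 v1 := by
  unfold attacked
  simp [abs_sub_comm, eq_comm]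

lemma fA_eq_att (q : List Int) (r1 r2 : Nat) :
    fA q r1 r2 = attacked ((r2 : Int) - (r1 : Int)) (q.getD r1 0) (q.getD r2 0) := by
  unfold fA attacked
  split_ifs with h1 h2 h3 h3 <;> tauto

-- getD facts about swapL
lemma length_swapL (q : List Int) (i j : Nat) : (swapL q i j).length = q.length := by
  simp [swapL]

lemma swapL_getD_other (q : List Int) (i j k : Nat) (hk1 : k ≠ i) (hk2 : k ≠ j) :
    (swapL q i j).getD k 0 = q.getD k 0 := by
  simp [swapL, List.getD_eq_getElem?_getD, List.getElem?_set_ne (Ne.symm hk2),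
    List.getElem?_set_ne (Ne.symm hk1)]

lemma swapL_getD_left (q : List Int) (i j : Nat) (hi : i < q.length) (hij : i ≠ j) :
    (swapL q i j).getD i 0 = q.getD j 0 := by
  rw [swapL, List.getD_eq_getElem?_getD, List.getElem?_set_ne (by omega),
    List.getElem?_set_self]
  · simp
  · omega

lemma swapL_getD_right (q : List Int) (i j : Nat) (hj : j < q.length) :
    (swapL q i j).getD j 0 = q.getD i 0 := by
  rw [swapL, List.getD_eq_getElem?_getD, List.getElem?_set_self]
  · simp
  · simp
    omega

-- foldl → Finset.sum bridges
lemma sum_map_range' (h : Nat → Int) (a n : Nat) :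
    ((List.range' a (n - a)).map h).sum = ∑ k ∈ Finset.Ico a n, h k := by
  rw [List.range'_eq_map_range, List.map_map, Finset.sum_Ico_eq_sum_range]
  rfl

lemma countAttack_eq (q : List Int) : countAttack q = F2 q q.length := by
  unfold countAttack F2
  have hstep : ∀ r1 : Nat,
      (fun (count : Int) (row2 : Nat) =>
          if q.getD r1 0 = q.getD row2 0 then count + 1
          else if |q.getD r1 0 - q.getD row2 0| = (row2 : Int) - (r1 : Int) then count + 1
          else count)
        = fun (count : Int) (row2 : Nat) => count + fA q r1 row2 := by
    intro r1
    funext c r2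
    simp only [fA]
    split_ifs <;> ring
  have houter :
      (fun (count : Int) (row1 : Nat) =>
          (List.range' (row1 + 1) (q.length - (row1 + 1))).foldl
            (fun (count : Int) (row2 : Nat) =>
              if q.getD row1 0 = q.getD row2 0 then count + 1
              else if |q.getD row1 0 - q.getD row2 0| = (row2 : Int) - (row1 : Int) then count + 1
              else count) count)
        = fun (count : Int) (row1 : Nat) =>
            count + ∑ r2 ∈ Finset.Ico (row1 + 1) q.length, fA q row1 r2 := by
    funext c r1
    rw [hstep r1, PySem.List.foldl_add, sum_map_range']
  rw [houter, PySem.List.foldl_add]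
  norm_num
  rfl

lemma totalB_eq (q : List Int) : totalB q = F2 q q.length := by
  unfold totalB F2
  have houter :
      (fun (total : Int) (r1 : Nat) =>
          (List.range' (r1 + 1) (q.length - (r1 + 1))).foldl
            (fun (total : Int) (r2 : Nat) =>
              total + attacked ((r2 : Int) - (r1 : Int)) (q.getD r1 0) (q.getD r2 0)) total)
        = fun (total : Int) (r1 : Nat) =>
            total + ∑ r2 ∈ Finset.Ico (r1 + 1) q.length, fA q r1 r2 := by
    funext c r1
    have : (fun (total : Int) (r2 : Nat) =>
        total + attacked ((r2 : Int) - (r1 : Int)) (q.getD r1 0) (q.getD r2 0))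
        = fun (total : Int) (r2 : Nat) => total + fA q r1 r2 := by
      funext c' r2
      rw [fA_eq_att]
    rw [this, PySem.List.foldl_add, sum_map_range']
  rw [houter, PySem.List.foldl_add]
  norm_num
  rfl

lemma deltaB_eq (q : List Int) (i j : Nat) :
    deltaB q i j
      = ∑ k ∈ Finset.range q.length,
          (if k = i ∨ k = j then 0 else a1 q i j k + b1 q i j k) := by
  unfold deltaB
  have hstep : (fun (delta : Int) (k : Nat) =>
      if k = i ∨ k = j then delta
      else
        let vk := q.getD k 0
        delta + (attacked |(i : Int) - (k : Int)| (q.getD j 0) vk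
                   - attacked |(i : Int) - (k : Int)| (q.getD i 0) vk)
              + (attacked |(j : Int) - (k : Int)| (q.getD i 0) vk
                   - attacked |(j : Int) - (k : Int)| (q.getD j 0) vk))
      = fun (delta : Int) (k : Nat) =>
          delta + (if k = i ∨ k = j then 0 else a1 q i j k + b1 q i j k) := by
    funext d k
    simp only [a1, b1]
    split_ifs <;> ring
  rw [hstep, PySem.List.foldl_add]
  norm_num
  rfl

-- sum collapses
lemma collapse_one (h : Nat → Int) (i n : Nat) (hi : i < n) :
    (∑ r1 ∈ Finset.range n, ∑ r2 ∈ Finset.Ico (r1 + 1) n,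
        ((if r1 = i then h r2 else 0) + (if r2 = i then h r1 else 0)))
      = (∑ k ∈ Finset.range n, h k) - h i := by
  have e1 : ∀ r1, (∑ r2 ∈ Finset.Ico (r1 + 1) n,
      ((if r1 = i then h r2 else 0) + (if r2 = i then h r1 else 0)))
      = (if r1 = i then ∑ r2 ∈ Finset.Ico (r1 + 1) n, h r2 else 0)
        + (if r1 < i then h r1 else 0) := by
    intro r1
    rw [Finset.sum_add_distrib]
    congr 1
    · by_cases hr : r1 = i <;> simp [hr]
    · rw [Finset.sum_ite_eq' (Finset.Ico (r1 + 1) n) i (fun _ => h r1)]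
      simp only [Finset.mem_Ico]
      by_cases hr : r1 < i <;> simp [hr, hi]
  calc (∑ r1 ∈ Finset.range n, ∑ r2 ∈ Finset.Ico (r1 + 1) n,
        ((if r1 = i then h r2 else 0) + (if r2 = i then h r1 else 0)))
      = ∑ r1 ∈ Finset.range n,
          ((if r1 = i then ∑ r2 ∈ Finset.Ico (r1 + 1) n, h r2 else 0)
            + (if r1 < i then h r1 else 0)) := Finset.sum_congr rfl (fun r1 _ => e1 r1)
    _ = (∑ r2 ∈ Finset.Ico (i + 1) n, h r2) + ∑ r1 ∈ Finset.range i, h r1 := by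
          rw [Finset.sum_add_distrib]
          congr 1
          · rw [Finset.sum_ite_eq' (Finset.range n) i]
            simp [hi]
          · rw [← Finset.sum_filter]
            congr 1
            ext x
            simp only [Finset.mem_filter, Finset.mem_range]
            omega
    _ = (∑ k ∈ Finset.range n, h k) - h i := by
          have hsplit : ∑ k ∈ Finset.Ico 0 i, h k + ∑ k ∈ Finset.Ico i n, h k
              = ∑ k ∈ Finset.Ico 0 n, h k :=
            Finset.sum_Ico_consecutive h (Nat.zero_le i) (le_of_lt hi)
          have hbot : ∑ k ∈ Finset.Ico i n, h k = h i + ∑ k ∈ Finset.Ico (i + 1) n, h k :=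
            Finset.sum_eq_sum_Ico_succ_bot hi h
          simp only [Finset.range_eq_Ico]
          linarith [hsplit, hbot]
lemma collapse_pair (c0 : Int) (i j n : Nat) (hi : i < n) (hj : j < n) (hij : i ≠ j) :
    (∑ r1 ∈ Finset.range n, ∑ r2 ∈ Finset.Ico (r1 + 1) n,
        (if (r1 = i ∧ r2 = j) ∨ (r1 = j ∧ r2 = i) then c0 else 0)) = c0 := by
  have epoint : ∀ r1 r2 : Nat,
      (if (r1 = i ∧ r2 = j) ∨ (r1 = j ∧ r2 = i) then c0 else 0)
        = (if r1 = i then (if r2 = j then c0 else 0) else 0)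
          + (if r1 = j then (if r2 = i then c0 else 0) else 0) := by
    intro r1 r2
    split_ifs <;> simp_all
  have e1 : ∀ (a b : Nat), (∑ r1 ∈ Finset.range n, ∑ r2 ∈ Finset.Ico (r1 + 1) n,
      (if r1 = a then (if r2 = b then c0 else 0) else 0))
      = if a < b ∧ b < n ∧ a < n then c0 else 0 := by
    intro a b
    have einner : ∀ r1, (∑ r2 ∈ Finset.Ico (r1 + 1) n,
        (if r1 = a then (if r2 = b then c0 else 0) else 0))
        = if r1 = a then (if r1 + 1 ≤ b ∧ b < n then c0 else 0) else 0 := by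
      intro r1
      by_cases hr : r1 = a
      · subst hr
        rw [Finset.sum_congr rfl (fun x _ => if_pos rfl), if_pos rfl,
          Finset.sum_ite_eq' (Finset.Ico (r1 + 1) n) b (fun _ => c0)]
        simp [Finset.mem_Ico]
      · simp [hr]
    rw [Finset.sum_congr rfl (fun r1 _ => einner r1),
      Finset.sum_ite_eq' (Finset.range n) a]
    by_cases ha : a < n <;> by_cases hb : a < b ∧ b < n <;> simp [ha, Finset.mem_range]
  calc (∑ r1 ∈ Finset.range n, ∑ r2 ∈ Finset.Ico (r1 + 1) n,
        (if (r1 = i ∧ r2 = j) ∨ (r1 = j ∧ r2 = i) then c0 else 0))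
      = (∑ r1 ∈ Finset.range n, ∑ r2 ∈ Finset.Ico (r1 + 1) n,
          (if r1 = i then (if r2 = j then c0 else 0) else 0))
        + (∑ r1 ∈ Finset.range n, ∑ r2 ∈ Finset.Ico (r1 + 1) n,
          (if r1 = j then (if r2 = i then c0 else 0) else 0)) := by
        rw [← Finset.sum_add_distrib]
        refine Finset.sum_congr rfl (fun r1 _ => ?_)
        rw [← Finset.sum_add_distrib]
        exact Finset.sum_congr rfl (fun r2 _ => epoint r1 r2)
    _ = c0 := by
        rw [e1, e1]
        rcases Nat.lt_or_ge i j with h | h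
        · have : ¬ j < i := by omega
          simp [h, hi, hj, this]
        · have hji : j < i := by omega
          have : ¬ i < j := by omega
          simp [hji, hi, hj, this]

-- pointwise effect of the swap on one pair of rows
lemma fA_swap (q : List Int) (i j r1 r2 : Nat) (hi : i < q.length) (hj : j < q.length)
    (hij : i ≠ j) (h12 : r1 < r2) (_h2n : r2 < q.length) :
    fA (swapL q i j) r1 r2
      = fA q r1 r2
        + ((if r1 = i then a1 q i j r2 else 0) + (if r2 = i then a1 q i j r1 else 0)
            + ((if r1 = j then b1 q i j r2 else 0) + (if r2 = j then b1 q i j r1 else 0))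
            - (if (r1 = i ∧ r2 = j) ∨ (r1 = j ∧ r2 = i) then a1 q i j j + b1 q i j i else 0)) := by
  have h12' : r1 ≠ r2 := Nat.ne_of_lt h12
  have habs : |(r1 : Int) - (r2 : Int)| = (r2 : Int) - (r1 : Int) := by
    rw [abs_sub_comm]; apply abs_of_nonneg; omega
  have habs' : |(r2 : Int) - (r1 : Int)| = (r2 : Int) - (r1 : Int) := by
    apply abs_of_nonneg; omega
  rw [fA_eq_att, fA_eq_att]
  by_cases e1 : r1 = i
  · subst e1
    rw [swapL_getD_left q r1 j hi hij]
    by_cases e4 : r2 = j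
    · -- swapped pair itself: both queens exchanged, distance unchanged
      subst e4
      rw [swapL_getD_right q r1 r2 hj,
        if_pos rfl, if_neg (Ne.symm h12'), if_neg h12', if_pos rfl,
        if_pos (show (r1 = r1 ∧ r2 = r2) ∨ (r1 = r2 ∧ r2 = r1) from Or.inl ⟨rfl, rfl⟩),
        attacked_comm ((r2 : Int) - (r1 : Int)) (q.getD r2 0) (q.getD r1 0)]
      ring
    · have hr2i : r2 ≠ r1 := Ne.symm h12'
      rw [swapL_getD_other q r1 j r2 hr2i e4,
        if_pos rfl, if_neg hr2i, if_neg hij, if_neg e4,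
        if_neg (show ¬((r1 = r1 ∧ r2 = j) ∨ (r1 = j ∧ r2 = r1)) from by
          rintro (⟨-, h⟩ | ⟨h, -⟩); exacts [e4 h, hij h])]
      simp only [a1]
      rw [habs]
      ring
  · by_cases e2 : r1 = j
    · subst e2
      rw [swapL_getD_right q i r1 hj]
      by_cases e3 : r2 = i
      · subst e3
        rw [swapL_getD_left q r2 r1 hi hij,
          if_neg h12', if_pos rfl, if_pos rfl, if_neg (Ne.symm h12'),
          if_pos (show (r1 = r2 ∧ r2 = r1) ∨ (r1 = r1 ∧ r2 = r2) from Or.inr ⟨rfl, rfl⟩),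
          attacked_comm ((r2 : Int) - (r1 : Int)) (q.getD r2 0) (q.getD r1 0)]
        ring
      · rw [swapL_getD_other q i r1 r2 e3 (Ne.symm h12'),
          if_neg e1, if_neg e3, if_pos rfl, if_neg (Ne.symm h12'),
          if_neg (show ¬((r1 = i ∧ r2 = r1) ∨ (r1 = r1 ∧ r2 = i)) from by
            rintro (⟨h, -⟩ | ⟨-, h⟩); exacts [e1 h, e3 h])]
        simp only [b1]
        rw [habs]
        ring
    · rw [swapL_getD_other q i j r1 e1 e2]
      by_cases e3 : r2 = i
      · subst e3
        rw [swapL_getD_left q r2 j hi hij,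
          if_neg h12', if_pos rfl, if_neg e2, if_neg (show r2 ≠ j from hij),
          if_neg (show ¬((r1 = r2 ∧ r2 = j) ∨ (r1 = j ∧ r2 = r2)) from by
            rintro (⟨h, -⟩ | ⟨h, -⟩); exacts [h12' h, e2 h])]
        simp only [a1]
        rw [habs',
          attacked_comm ((r2 : Int) - (r1 : Int)) (q.getD j 0) (q.getD r1 0),
          attacked_comm ((r2 : Int) - (r1 : Int)) (q.getD r2 0) (q.getD r1 0)]
        ring
      · by_cases e4 : r2 = j
        · subst e4
          rw [swapL_getD_right q i r2 hj,
            if_neg e1, if_neg (Ne.symm hij), if_neg e2, if_pos rfl,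
            if_neg (show ¬((r1 = i ∧ r2 = r2) ∨ (r1 = r2 ∧ r2 = i)) from by
              rintro (⟨h, -⟩ | ⟨h, -⟩); exacts [e1 h, h12' h])]
          simp only [b1]
          rw [habs',
            attacked_comm ((r2 : Int) - (r1 : Int)) (q.getD i 0) (q.getD r1 0),
            attacked_comm ((r2 : Int) - (r1 : Int)) (q.getD r2 0) (q.getD r1 0)]
          ring
        · rw [swapL_getD_other q i j r2 e3 e4,
            if_neg e1, if_neg e3, if_neg e2, if_neg e4,
            if_neg (show ¬((r1 = i ∧ r2 = j) ∨ (r1 = j ∧ r2 = i)) from by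
              rintro (⟨h, -⟩ | ⟨h, -⟩); exacts [e1 h, e2 h])]
          ring

lemma sum2_add (n : Nat) (f g : Nat → Nat → Int) :
    (∑ r1 ∈ Finset.range n, ∑ r2 ∈ Finset.Ico (r1 + 1) n, (f r1 r2 + g r1 r2))
      = (∑ r1 ∈ Finset.range n, ∑ r2 ∈ Finset.Ico (r1 + 1) n, f r1 r2)
        + (∑ r1 ∈ Finset.range n, ∑ r2 ∈ Finset.Ico (r1 + 1) n, g r1 r2) := by
  rw [← Finset.sum_add_distrib]
  exact Finset.sum_congr rfl (fun r1 _ => by rw [Finset.sum_add_distrib])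

lemma sum2_sub (n : Nat) (f g : Nat → Nat → Int) :
    (∑ r1 ∈ Finset.range n, ∑ r2 ∈ Finset.Ico (r1 + 1) n, (f r1 r2 - g r1 r2))
      = (∑ r1 ∈ Finset.range n, ∑ r2 ∈ Finset.Ico (r1 + 1) n, f r1 r2)
        - (∑ r1 ∈ Finset.range n, ∑ r2 ∈ Finset.Ico (r1 + 1) n, g r1 r2) := by
  rw [← Finset.sum_sub_distrib]
  exact Finset.sum_congr rfl (fun r1 _ => by rw [Finset.sum_sub_distrib])

-- the incremental delta is exactly the change of the full pair count under the swap
lemma key_sum (q : List Int) (i j : Nat) (hi : i < q.length) (hj : j < q.length)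
    (hij : i ≠ j) :
    F2 (swapL q i j) q.length
      = F2 q q.length
        + ∑ k ∈ Finset.range q.length,
            (if k = i ∨ k = j then 0 else a1 q i j k + b1 q i j k) := by
  have hcongr : F2 (swapL q i j) q.length
      = ∑ r1 ∈ Finset.range q.length, ∑ r2 ∈ Finset.Ico (r1 + 1) q.length,
          (fA q r1 r2
            + (((if r1 = i then a1 q i j r2 else 0) + (if r2 = i then a1 q i j r1 else 0)
                + ((if r1 = j then b1 q i j r2 else 0) + (if r2 = j then b1 q i j r1 else 0)))
              - (if (r1 = i ∧ r2 = j) ∨ (r1 = j ∧ r2 = i) then a1 q i j j + b1 q i j i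
                 else 0))) := by
    unfold F2
    refine Finset.sum_congr rfl (fun r1 hr1 => Finset.sum_congr rfl (fun r2 hr2 => ?_))
    have h1 : r1 < r2 := (Finset.mem_Ico.mp hr2).1
    have h2 : r2 < q.length := (Finset.mem_Ico.mp hr2).2
    rw [fA_swap q i j r1 r2 hi hj hij h1 h2]
  rw [hcongr,
    sum2_add q.length (fun r1 r2 => fA q r1 r2)
      (fun r1 r2 =>
        (((if r1 = i then a1 q i j r2 else 0) + (if r2 = i then a1 q i j r1 else 0)
            + ((if r1 = j then b1 q i j r2 else 0) + (if r2 = j then b1 q i j r1 else 0)))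
          - (if (r1 = i ∧ r2 = j) ∨ (r1 = j ∧ r2 = i) then a1 q i j j + b1 q i j i else 0))),
    sum2_sub q.length
      (fun r1 r2 =>
        ((if r1 = i then a1 q i j r2 else 0) + (if r2 = i then a1 q i j r1 else 0)
          + ((if r1 = j then b1 q i j r2 else 0) + (if r2 = j then b1 q i j r1 else 0))))
      (fun r1 r2 =>
        (if (r1 = i ∧ r2 = j) ∨ (r1 = j ∧ r2 = i) then a1 q i j j + b1 q i j i else 0)),
    sum2_add q.length
      (fun r1 r2 => (if r1 = i then a1 q i j r2 else 0) + (if r2 = i then a1 q i j r1 else 0))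
      (fun r1 r2 => (if r1 = j then b1 q i j r2 else 0) + (if r2 = j then b1 q i j r1 else 0)),
    collapse_one (fun k => a1 q i j k) i q.length hi,
    collapse_one (fun k => b1 q i j k) j q.length hj,
    collapse_pair (a1 q i j j + b1 q i j i) i j q.length hi hj hij]
  have hrhs : ∑ k ∈ Finset.range q.length,
        (if k = i ∨ k = j then 0 else a1 q i j k + b1 q i j k)
      = (∑ k ∈ Finset.range q.length, (a1 q i j k + b1 q i j k))
        - (a1 q i j i + b1 q i j i) - (a1 q i j j + b1 q i j j) := by
    have hpt : ∀ k : Nat, (if k = i ∨ k = j then 0 else a1 q i j k + b1 q i j k)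
        = (a1 q i j k + b1 q i j k)
          - (if k = i then a1 q i j k + b1 q i j k else 0)
          - (if k = j then a1 q i j k + b1 q i j k else 0) := by
      intro k
      by_cases h1 : k = i
      · subst h1
        rw [if_pos (Or.inl rfl), if_pos rfl, if_neg hij]
        ring
      · by_cases h2 : k = j
        · subst h2
          rw [if_pos (Or.inr rfl), if_neg h1, if_pos rfl]
          ring
        · rw [if_neg (by tauto), if_neg h1, if_neg h2]
          ring
    rw [Finset.sum_congr rfl (fun k _ => hpt k), Finset.sum_sub_distrib,
      Finset.sum_sub_distrib,
      Finset.sum_ite_eq' (Finset.range q.length) i (fun k => a1 q i j k + b1 q i j k),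
      Finset.sum_ite_eq' (Finset.range q.length) j (fun k => a1 q i j k + b1 q i j k)]
    simp [Finset.mem_range, hi, hj]
  rw [hrhs, Finset.sum_add_distrib]
  unfold F2
  ring

lemma key (q : List Int) (i j : Nat) (hi : i < q.length) (hj : j < q.length) (hij : i ≠ j) :
    countAttack ((q.set i (q.getD j 0)).set j (q.getD i 0)) = cB q (i, j) := by
  have h1 : countAttack (swapL q i j) = F2 (swapL q i j) q.length := by
    rw [countAttack_eq, length_swapL]
  rw [show (q.set i (q.getD j 0)).set j (q.getD i 0) = swapL q i j from rfl, h1,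
    key_sum q i j hi hj hij, cB, totalB_eq, deltaB_eq]

-- both ports' nested loops, flattened over the ordered-pair list
lemma moveTwo_eq (q : List Int) :
    moveTwo q
      = (let st := (pairsL q.length).foldl (stepA q) (q, (q.length : Int), none)
         match st.2.2 with
         | some (x, y) => (st.1.set x (st.1.getD y 0)).set y (st.1.getD x 0)
         | none => st.1) := by
  unfold moveTwo pairsL
  rw [List.foldl_flatMap]
  simp only [List.foldl_map]
  rfl

lemma moveTwo_alt_eq (q : List Int) :
    moveTwo_alt q
      = (let sel := (pairsL q.length).foldl (stepB q) (none, 0, 0)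
         match sel.1 with
         | none => q
         | some _ => (q.set sel.2.1 (q.getD sel.2.2 0)).set sel.2.2 (q.getD sel.2.1 0)) := by
  unfold moveTwo_alt pairsL
  rw [List.foldl_flatMap]
  simp only [List.foldl_map]
  rfl

-- fold two state machines in parallel along the same list, tracking the processed prefix
lemma foldl_par {γ α β : Type} (R : List γ → α → β → Prop) (f : α → γ → α) (g : β → γ → β)
    (L : List γ)
    (hstep : ∀ (p : List γ) (x : γ) (a : α) (b : β), x ∈ L → R p a b →
      R (p ++ [x]) (f a x) (g b x)) :
    ∀ (l pre : List γ), pre ++ l = L → ∀ (a : α) (b : β), R pre a b →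
      R L (l.foldl f a) (l.foldl g b) := by
  intro l
  induction l with
  | nil =>
    intro pre h a b hR
    simp only [List.append_nil] at h
    subst h
    simpa using hR
  | cons x t ih =>
    intro pre h a b hR
    simp only [List.foldl_cons]
    refine ih (pre ++ [x]) (by rw [← h]; simp) _ _ ?_
    refine hstep pre x a b ?_ hR
    rw [← h]
    simp

-- the invariant tying A's threshold selection to B's running minimum
def InvAB (q : List Int) (pre : List (Nat × Nat)) (sa : List Int × Int × Option (Nat × Nat))
    (sb : Option Int × Nat × Nat) : Prop :=
  sa.1 = q ∧
  ((sb.1 = none ∧ sa.2.1 = (q.length : Int) ∧ sa.2.2 = none ∧ ∀ p ∈ pre, p.1 = p.2) ∨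
   (∃ m : Int, sb.1 = some m ∧ (∀ p ∈ pre, p.1 ≠ p.2 → m ≤ cB q p) ∧
     ((m ≤ (q.length : Int) ∧ sa.2.1 = m ∧ sa.2.2 = some (sb.2.1, sb.2.2)) ∨
      ((q.length : Int) < m ∧ sa.2.1 = (q.length : Int) ∧ sa.2.2 = none))))

lemma step_Inv (q : List Int) (pre : List (Nat × Nat)) (x : Nat × Nat)
    (sa : List Int × Int × Option (Nat × Nat)) (sb : Option Int × Nat × Nat)
    (hx : x ∈ pairsL q.length) (h : InvAB q pre sa sb) :
    InvAB q (pre ++ [x]) (stepA q sa x) (stepB q sb x) := by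
  obtain ⟨hq, hrest⟩ := h
  have hx1 : x.1 < q.length := (mem_pairsL.mp hx).1
  have hx2 : x.2 < q.length := (mem_pairsL.mp hx).2
  by_cases hd : x.1 = x.2
  · rw [stepA, stepB, if_pos hd, if_pos hd]
    refine ⟨hq, ?_⟩
    rcases hrest with ⟨h1, h2, h3, hall⟩ | ⟨m, hm, hbound, hcase⟩
    · exact Or.inl ⟨h1, h2, h3, by
        intro p hp
        rcases List.mem_append.mp hp with hp | hp
        · exact hall p hp
        · rw [List.mem_singleton.mp hp]; exact hd⟩
    · exact Or.inr ⟨m, hm, by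
        intro p hp hne
        rcases List.mem_append.mp hp with hp | hp
        · exact hbound p hp hne
        · exact absurd (List.mem_singleton.mp hp ▸ hd) hne, hcase⟩
  · have ha : countAttack ((sa.1.set x.1 (sa.1.getD x.2 0)).set x.2 (sa.1.getD x.1 0))
        = cB q x := by
      rw [hq]
      exact key q x.1 x.2 hx1 hx2 hd
    rw [stepA, stepB, if_neg hd, if_neg hd]
    simp only [ha]
    rcases hrest with ⟨h1, h2, h3, hall⟩ | ⟨m, hm, hbound, hcase⟩
    · -- first real candidate
      simp only [h1]
      by_cases hle : cB q x ≤ sa.2.1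
      · rw [if_pos hle]
        refine ⟨rfl, Or.inr ⟨cB q x, rfl, ?_, Or.inl ⟨by rw [h2] at hle; exact hle, rfl, rfl⟩⟩⟩
        intro p hp hne
        rcases List.mem_append.mp hp with hp | hp
        · exact absurd (hall p hp) hne
        · rw [List.mem_singleton.mp hp]
      · rw [if_neg hle]
        refine ⟨rfl, Or.inr ⟨cB q x, rfl, ?_, Or.inr ⟨by omega, h2, h3⟩⟩⟩
        · intro p hp hne
          rcases List.mem_append.mp hp with hp | hp
          · exact absurd (hall p hp) hne
          · rw [List.mem_singleton.mp hp]
    · simp only [hm]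
      rcases hcase with ⟨hmn, hb, hxy⟩ | ⟨hmn, hb, hxy⟩
      · -- a minimum ≤ n is already tracked by both
        by_cases hle : cB q x ≤ m
        · rw [if_pos (show cB q x ≤ sa.2.1 by rw [hb]; exact hle), if_pos hle]
          refine ⟨rfl, Or.inr ⟨cB q x, rfl, ?_, Or.inl ⟨le_trans hle hmn, rfl, rfl⟩⟩⟩
          intro p hp hne
          rcases List.mem_append.mp hp with hp | hp
          · exact le_trans hle (hbound p hp hne)
          · rw [List.mem_singleton.mp hp]
        · rw [if_neg (show ¬ cB q x ≤ sa.2.1 by rw [hb]; exact hle), if_neg hle]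
          refine ⟨rfl, Or.inr ⟨m, hm, ?_, Or.inl ⟨hmn, hb, hxy⟩⟩⟩
          intro p hp hne
          rcases List.mem_append.mp hp with hp | hp
          · exact hbound p hp hne
          · rw [List.mem_singleton.mp hp]; omega
      · -- every candidate so far was worse than the initial threshold n
        by_cases hle : cB q x ≤ m
        · rw [if_pos hle]
          by_cases hn : cB q x ≤ (q.length : Int)
          · rw [if_pos (show cB q x ≤ sa.2.1 by rw [hb]; omega)]
            refine ⟨rfl, Or.inr ⟨cB q x, rfl, ?_, Or.inl ⟨hn, rfl, rfl⟩⟩⟩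
            intro p hp hne
            rcases List.mem_append.mp hp with hp | hp
            · exact le_trans hle (hbound p hp hne)
            · rw [List.mem_singleton.mp hp]
          · rw [if_neg (show ¬ cB q x ≤ sa.2.1 by rw [hb]; omega)]
            refine ⟨rfl, Or.inr ⟨cB q x, rfl, ?_, Or.inr ⟨by omega, hb, hxy⟩⟩⟩
            intro p hp hne
            rcases List.mem_append.mp hp with hp | hp
            · exact le_trans hle (hbound p hp hne)
            · rw [List.mem_singleton.mp hp]
        · have hn : ¬ cB q x ≤ (q.length : Int) := by omega
          rw [if_neg hle, if_neg (show ¬ cB q x ≤ sa.2.1 by rw [hb]; omega)]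
          refine ⟨rfl, Or.inr ⟨m, hm, ?_, Or.inr ⟨hmn, hb, hxy⟩⟩⟩
          intro p hp hne
          rcases List.mem_append.mp hp with hp | hp
          · exact hbound p hp hne
          · rw [List.mem_singleton.mp hp]; omega

-- ===== VERDICT (by name: the statement is the Claim_ definition above) =====
theorem moveTwo_spec : Claim_equal_moveTwo := by
  intro q _ hpre
  unfold Spec_moveTwo
  obtain ⟨hlen, i, hi, j, hj, hij, hc⟩ := hpre
  have hmem : ((i, j) : Nat × Nat) ∈ pairsL q.length := mem_pairsL.mpr ⟨hi, hj⟩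
  have hcB : cB q (i, j) ≤ (q.length : Int) := by
    rw [← key q i j hi hj hij]
    exact hc
  have hInv : InvAB q (pairsL q.length)
      ((pairsL q.length).foldl (stepA q) (q, (q.length : Int), none))
      ((pairsL q.length).foldl (stepB q) (none, 0, 0)) := by
    refine foldl_par (InvAB q) (stepA q) (stepB q) (pairsL q.length)
      (fun p x a b hx hR => step_Inv q p x a b hx hR)
      (pairsL q.length) [] rfl _ _ ?_
    exact ⟨rfl, Or.inl ⟨rfl, rfl, rfl, by simp⟩⟩
  rw [moveTwo_eq, moveTwo_alt_eq]
  obtain ⟨hq1, hrest⟩ := hInv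
  rcases hrest with ⟨-, -, -, hall⟩ | ⟨m, hm, hbound, hcase⟩
  · exact absurd (hall (i, j) hmem) hij
  · have hmn : m ≤ (q.length : Int) := le_trans (hbound (i, j) hmem hij) hcB
    rcases hcase with ⟨-, -, hxy⟩ | ⟨hgt, -, -⟩
    · simp only [hm, hxy, hq1]
    · omega
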